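-- pv_equiv track=rewrite | github.com/berengerbenam/Python | bn/3.py | moveDigit
-- ===== SOURCE A (Python) =====
-- def digit_in_word(word):
--     # initialisation d'un compteur
--     counter = 0
--     for x in word:
--         if x.isdigit():
--             counter = counter + 1
--
--     if counter > 0:
--         return True
--     else:
--         return False
--
-- def moveDigit(T):
--     # transformation de la chaine texte T en une liste
--     L = T.split()
--
--     # initialisation de la liste des mots qui ne contiennent aucun chiffre
--     L_without_digit = []
--
--     # initialisation de la liste des mots qui contiennent au moins un chiffre
--     L_with_digit = []
--
--     # parcourir les éléments de la liste L et rechercher les mots qui contiennent des chiffres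
--     for word in L:
--         if digit_in_word(word):
--             L_with_digit.append(word)
--         else:
--             L_without_digit.append(word)
--
--     result = L_without_digit + L_with_digit
--
--     return result
-- ===== SOURCE B (Python) =====
-- def moveDigit(T):
--     # Stable sort by a boolean key: digit-free words (False) first, then
--     # digit-containing words (True); stability preserves original order.
--     return sorted(T.split(), key=lambda w: any(c.isdigit() for c in w))
-- ===== Notes on version B (the rewrite author's own statement) =====
-- stated objective: idiomatic
-- what changed: Replaces the counter-based digit test and the explicit two-bucket partition loop with a single stable sort keyed on any(c.isdigit() for c in w).
import Mathlib
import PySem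

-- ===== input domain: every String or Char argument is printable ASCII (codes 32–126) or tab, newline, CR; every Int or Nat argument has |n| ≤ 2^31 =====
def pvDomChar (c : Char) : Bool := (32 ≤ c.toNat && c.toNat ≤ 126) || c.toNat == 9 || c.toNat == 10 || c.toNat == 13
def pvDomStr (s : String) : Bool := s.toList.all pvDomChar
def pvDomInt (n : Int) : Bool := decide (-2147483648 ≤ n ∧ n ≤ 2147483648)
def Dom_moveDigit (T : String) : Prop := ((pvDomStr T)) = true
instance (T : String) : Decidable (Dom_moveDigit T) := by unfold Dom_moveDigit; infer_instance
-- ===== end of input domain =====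

-- B replaces A's counter-based digit test and explicit two-bucket partition loop
-- with a single stable sort on a boolean "contains a digit" key (idiomatic; same result).

-- ===== PORT A =====
def digitInWord (word : String) : Bool :=
  let counter : Int :=
    word.toList.foldl (fun c x => if PySem.Chars.isdigit x then c + 1 else c) 0
  if counter > 0 then true else false

def moveDigit (T : String) : List String :=
  let L := PySem.Str.split₀ T
  let p := L.foldl
    (fun (p : List String × List String) word =>
      if digitInWord word then (p.1, p.2 ++ [word]) else (p.1 ++ [word], p.2))
    ([], [])
  p.1 ++ p.2

-- ===== PORT B =====
def hasDigit (w : String) : Bool := w.toList.any PySem.Chars.isdigit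

def moveDigit_alt (T : String) : List String :=
  PySem.List.sorted (PySem.Str.split₀ T) hasDigit

-- ===== PRECONDITION & SPEC =====
def Spec_moveDigit (T : String) (out : List String) : Prop := out = moveDigit_alt T
instance (T : String) (out : List String) : Decidable (Spec_moveDigit T out) := by unfold Spec_moveDigit; infer_instance

-- ===== CLAIM (what is proved, stated in full; the proofs are below) =====
def Claim_equal_moveDigit : Prop := ∀ (T : String), Dom_moveDigit T → Spec_moveDigit T (moveDigit T)

-- ===== LEMMAS AND PROOFS =====

lemma counter_add (cs : List Char) (c : Int) :
    cs.foldl (fun c x => if PySem.Chars.isdigit x then c + 1 else c) c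
      = c + (cs.countP PySem.Chars.isdigit : Int) := by
  induction cs generalizing c with
  | nil => simp
  | cons h t ih =>
    simp only [List.foldl_cons, List.countP_cons, ih]
    split_ifs with hh
    · simp; ring
    · simp

lemma digitInWord_eq (w : String) : digitInWord w = hasDigit w := by
  simp only [digitInWord, counter_add, zero_add, hasDigit]
  by_cases h : ∃ a ∈ w.toList, PySem.Chars.isdigit a = true
  · have h1 : 0 < w.toList.countP PySem.Chars.isdigit := List.countP_pos_iff.mpr h
    have h2 : w.toList.any PySem.Chars.isdigit = true := List.any_eq_true.mpr h
    simp [h2]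
    omega
  · have h1 : w.toList.countP PySem.Chars.isdigit = 0 := by
      rw [List.countP_eq_zero]
      intro a ha
      simp only [not_exists, not_and] at h
      simpa using h a ha
    have h2 : w.toList.any PySem.Chars.isdigit = false := by
      rw [List.any_eq_false]
      intro a ha
      simp only [not_exists, not_and] at h
      simpa using h a ha
    simp [h1, h2]

lemma insert_false (x : String) (hx : hasDigit x = false) :
    ∀ (a1 a2 : List String), (∀ w ∈ a1, hasDigit w = false) → (∀ w ∈ a2, hasDigit w = true) →
    PySem.List.insertBy (fun a b => decide (hasDigit a < hasDigit b)) x (a1 ++ a2)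
      = a1 ++ x :: a2 := by
  intro a1
  induction a1 with
  | nil =>
    intro a2 _ h2
    cases a2 with
    | nil => simp [PySem.List.insertBy]
    | cons y ys =>
      have hy := h2 y (by simp)
      simp [PySem.List.insertBy, hx, hy]
  | cons h t ih =>
    intro a2 h1 h2
    have hh := h1 h (by simp)
    simp only [List.cons_append, PySem.List.insertBy, hx, hh]
    simp [ih a2 (fun w hw => h1 w (by simp [hw])) h2]

lemma insert_true (x : String) (hx : hasDigit x = true) (l : List String) :
    PySem.List.insertBy (fun a b => decide (hasDigit a < hasDigit b)) x l = l ++ [x] := by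
  apply PySem.List.insertBy_of_forall_not_before
  intro y _
  simp [hx]

lemma main_inv :
    ∀ (L a1 a2 : List String),
    (∀ w ∈ a1, hasDigit w = false) → (∀ w ∈ a2, hasDigit w = true) →
    L.foldl (fun acc x => PySem.List.insertBy (fun a b => decide (hasDigit a < hasDigit b)) x acc)
        (a1 ++ a2)
      = (L.foldl
          (fun (p : List String × List String) word =>
            if digitInWord word then (p.1, p.2 ++ [word]) else (p.1 ++ [word], p.2))
          (a1, a2)).1
        ++ (L.foldl
          (fun (p : List String × List String) word =>
            if digitInWord word then (p.1, p.2 ++ [word]) else (p.1 ++ [word], p.2))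
          (a1, a2)).2 := by
  intro L
  induction L with
  | nil => intro a1 a2 _ _; simp
  | cons x t ih =>
    intro a1 a2 h1 h2
    simp only [List.foldl_cons, digitInWord_eq]
    cases hx : hasDigit x with
    | false =>
      rw [insert_false x hx a1 a2 h1 h2]
      have := ih (a1 ++ [x]) a2
        (fun w hw => by rcases List.mem_append.mp hw with h | h
                        · exact h1 w h
                        · simp at h; simpa [h] using hx) h2
      simpa [digitInWord_eq, hx] using this
    | true =>
      rw [insert_true x hx]
      have := ih a1 (a2 ++ [x]) h1
        (fun w hw => by rcases List.mem_append.mp hw with h | h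
                        · exact h2 w h
                        · simp at h; simpa [h] using hx)
      simpa [digitInWord_eq, hx] using this

-- ===== VERDICT (by name: the statement is the Claim_ definition above) =====
theorem moveDigit_spec : Claim_equal_moveDigit := by
  intro T _
  show moveDigit T = moveDigit_alt T
  unfold moveDigit moveDigit_alt
  rw [PySem.List.sorted_eq_foldl_insertBy]
  exact (main_inv (PySem.Str.split₀ T) [] [] (by simp) (by simp)).symm
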